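-- pv_equiv track=rewrite | github.com/a7266165/Alz_face_analyze | scripts/external/asian_age_stats.py | binned_summary
-- ===== SOURCE A (Python) =====
-- from collections import Counter, defaultdict
--
-- AGE_BINS = [
--     (0, 9, "0-9"),
--     (10, 19, "10-19"),
--     (20, 29, "20-29"),
--     (30, 39, "30-39"),
--     (40, 49, "40-49"),
--     (50, 59, "50-59"),
--     (60, 69, "60-69"),
--     (70, 79, "70-79"),
--     (80, 89, "80-89"),
--     (90, 199, "90+"),
-- ]
--
-- def age_to_bin(age):
--     for lo, hi, label in AGE_BINS:
--         if lo <= age <= hi: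
--             return label
--     return "unknown"
--
-- def binned_summary(name, age_counts, total):
--     """Convert exact ages to age bins"""
--     binned = Counter()
--     for age, count in age_counts.items():
--         if age < 0:
--             binned["unknown"] += count
--         else:
--             binned[age_to_bin(age)] += count
--     return binned
-- ===== SOURCE B (Python) =====
-- from collections import Counter
--
-- _BIN_LABELS = ["0-9", "10-19", "20-29", "30-39", "40-49",
--                "50-59", "60-69", "70-79", "80-89"]
--
-- def _bin_label(age):
--     if age < 0 or age > 199:
--         return "unknown"
--     if age >= 90:
--         return "90+"
--     return _BIN_LABELS[age // 10]
--
-- def binned_summary(name, age_counts, total):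
--     """Convert exact ages to age bins"""
--     binned = Counter()
--     for age, count in age_counts.items():
--         binned[_bin_label(age)] += count
--     return binned
-- ===== Notes on version B (the rewrite author's own statement) =====
-- stated objective: simpler
-- what changed: Replaces the linear scan over the AGE_BINS table (and the caller-side age<0 guard) with a single closed-form mapping: range guards plus direct indexing of a label list by age // 10.
import Mathlib
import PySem

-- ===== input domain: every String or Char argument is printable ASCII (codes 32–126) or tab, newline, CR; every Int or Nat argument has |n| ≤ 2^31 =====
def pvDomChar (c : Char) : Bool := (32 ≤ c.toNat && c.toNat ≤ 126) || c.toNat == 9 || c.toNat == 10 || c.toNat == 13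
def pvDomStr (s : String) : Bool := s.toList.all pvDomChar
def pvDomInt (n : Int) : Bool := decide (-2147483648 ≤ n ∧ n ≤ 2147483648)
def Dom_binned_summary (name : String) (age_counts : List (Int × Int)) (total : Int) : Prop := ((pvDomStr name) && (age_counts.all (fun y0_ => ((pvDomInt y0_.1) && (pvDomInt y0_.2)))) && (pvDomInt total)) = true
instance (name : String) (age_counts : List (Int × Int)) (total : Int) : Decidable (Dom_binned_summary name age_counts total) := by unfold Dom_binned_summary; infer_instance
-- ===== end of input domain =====

-- B replaces A's linear scan over the AGE_BINS table (plus the caller-side age<0 guard)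
-- with one closed-form mapping: range guards and direct indexing of a label list by age // 10. Objective: simpler.

-- ===== PORT A =====
def AGE_BINS : List (Int × Int × String) :=
  [(0, 9, "0-9"), (10, 19, "10-19"), (20, 29, "20-29"), (30, 39, "30-39"),
   (40, 49, "40-49"), (50, 59, "50-59"), (60, 69, "60-69"), (70, 79, "70-79"),
   (80, 89, "80-89"), (90, 199, "90+")]

-- the 'for lo, hi, label in AGE_BINS' loop with early return
def age_to_bin_loop (bins : List (Int × Int × String)) (age : Int) : String :=
  match bins with
  | [] => "unknown"
  | (lo, hi, label) :: rest =>
      if lo ≤ age ∧ age ≤ hi then label else age_to_bin_loop rest age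

def age_to_bin (age : Int) : String := age_to_bin_loop AGE_BINS age

def binned_summary (name : String) (age_counts : List (Int × Int)) (total : Int) : List (String × Int) :=
  (age_counts.foldl (fun (binned : PySem.Dict String Int) p =>
      if p.1 < 0 then binned.modify "unknown" 0 (· + p.2)
      else binned.modify (age_to_bin p.1) 0 (· + p.2)) PySem.Dict.empty).items

-- ===== PORT B =====
def BIN_LABELS : List String :=
  ["0-9", "10-19", "20-29", "30-39", "40-49", "50-59", "60-69", "70-79", "80-89"]

def bin_label (age : Int) : String :=
  if age < 0 ∨ 199 < age then "unknown"
  else if 90 ≤ age then "90+"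
  else PySem.List.pyGetD BIN_LABELS (PySem.Int.floordiv age 10) ""

def binned_summary_alt (name : String) (age_counts : List (Int × Int)) (total : Int) : List (String × Int) :=
  (age_counts.foldl (fun (binned : PySem.Dict String Int) p =>
      binned.modify (bin_label p.1) 0 (· + p.2)) PySem.Dict.empty).items

-- ===== PRECONDITION & SPEC =====
def Spec_binned_summary (name : String) (age_counts : List (Int × Int)) (total : Int) (out : List (String × Int)) : Prop := out = binned_summary_alt name age_counts total
instance (name : String) (age_counts : List (Int × Int)) (total : Int) (out : List (String × Int)) : Decidable (Spec_binned_summary name age_counts total out) := by unfold Spec_binned_summary; infer_instance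

-- ===== CLAIM (what is proved, stated in full; the proofs are below) =====
def Claim_equal_binned_summary : Prop := ∀ (name : String) (age_counts : List (Int × Int)) (total : Int), Dom_binned_summary name age_counts total → Spec_binned_summary name age_counts total (binned_summary name age_counts total)

-- ===== LEMMAS AND PROOFS =====

-- A's scan over the literal AGE_BINS table, written out as the if-chain it reduces to
lemma age_to_bin_eq (a : Int) : age_to_bin a =
    (if 0 ≤ a ∧ a ≤ 9 then "0-9" else if 10 ≤ a ∧ a ≤ 19 then "10-19"
     else if 20 ≤ a ∧ a ≤ 29 then "20-29" else if 30 ≤ a ∧ a ≤ 39 then "30-39"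
     else if 40 ≤ a ∧ a ≤ 49 then "40-49" else if 50 ≤ a ∧ a ≤ 59 then "50-59"
     else if 60 ≤ a ∧ a ≤ 69 then "60-69" else if 70 ≤ a ∧ a ≤ 79 then "70-79"
     else if 80 ≤ a ∧ a ≤ 89 then "80-89" else if 90 ≤ a ∧ a ≤ 199 then "90+"
     else "unknown") := rfl

-- the two key functions agree on every integer age
lemma key_eq (a : Int) : (if a < 0 then "unknown" else age_to_bin a) = bin_label a := by
  rcases lt_or_ge a 0 with h0 | h0
  · rw [if_pos h0]
    unfold bin_label
    rw [if_pos (Or.inl h0)]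
  · rw [if_neg (not_lt.mpr h0), age_to_bin_eq]
    rcases lt_or_ge (199 : Int) a with h1 | h1
    · unfold bin_label
      rw [if_pos (Or.inr h1)]
      split_ifs <;> first | omega | rfl
    · rcases lt_or_ge a 90 with h2 | h2
      · have hl : 0 ≤ a := h0
        have hr : a ≤ 89 := by omega
        interval_cases a <;> decide
      · unfold bin_label
        rw [if_neg (by omega), if_pos h2]
        split_ifs <;> first | omega | rfl

lemma fold_eq (age_counts : List (Int × Int)) (d : PySem.Dict String Int) :
    age_counts.foldl (fun (binned : PySem.Dict String Int) p =>
        if p.1 < 0 then binned.modify "unknown" 0 (· + p.2)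
        else binned.modify (age_to_bin p.1) 0 (· + p.2)) d
      = age_counts.foldl (fun (binned : PySem.Dict String Int) p =>
          binned.modify (bin_label p.1) 0 (· + p.2)) d := by
  induction age_counts generalizing d with
  | nil => rfl
  | cons p rest ih =>
      simp only [List.foldl_cons]
      rw [← ih]
      congr 1
      by_cases h : p.1 < 0
      · rw [if_pos h, show "unknown" = bin_label p.1 from by rw [← key_eq p.1, if_pos h]]
      · rw [if_neg h, show age_to_bin p.1 = bin_label p.1 from by rw [← key_eq p.1, if_neg h]]

-- ===== VERDICT (by name: the statement is the Claim_ definition above) =====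
theorem binned_summary_spec : Claim_equal_binned_summary := by
  intro name age_counts total _
  show binned_summary name age_counts total = binned_summary_alt name age_counts total
  unfold binned_summary binned_summary_alt
  rw [fold_eq]
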